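-- pv_equiv track=rewrite | github.com/rowancallahan/speaky | transpiler.py | _process_dot_access
-- ===== SOURCE A (Python) =====
-- def _process_dot_access(text):
--     """Replace 'X into Y' and 'X dot Y' with 'X.Y' for attribute access.
--
--     Only applies outside of call expressions (which handle dot/into separately).
--     """
--     words = text.split()
--     if not words:
--         return text
--     result = []
--     i = 0
--     while i < len(words):
--         if i + 1 < len(words) and words[i] in ("into", "dot") and result:
--             # Join previous word with next word via dot
--             prev = result.pop()
--             result.append(prev + "." + words[i + 1])
--             i += 2
--         else:
--             result.append(words[i])
--             i += 1
--     return " ".join(result)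
-- ===== SOURCE B (Python) =====
-- def _process_dot_access(text):
--     """Replace 'X into Y' and 'X dot Y' with 'X.Y' for attribute access.
--
--     Schedule-then-render: first compute the set of connector positions that
--     trigger a merge, then render the output in a second pass by choosing a
--     '.' or ' ' separator in front of each surviving word.
--     """
--     words = text.split()
--     if not words:
--         return text
--     n = len(words)
--     # phase 1: schedule which connector positions merge (never position 0)
--     merges = []
--     i = 1
--     while i + 1 < n:
--         if words[i] in ("into", "dot"):
--             merges.append(i)
--             i += 2
--         else:
--             i += 1
--     msk = set(merges)
--     # phase 2: render from the schedule
--     out = [words[0]]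
--     for k in range(1, n):
--         if k in msk:
--             continue
--         out.append(("." if k - 1 in msk else " ") + words[k])
--     return "".join(out)
-- ===== Notes on version B (the rewrite author's own statement) =====
-- stated objective: alternative
-- what changed: Replaces A's incremental result-list construction (pop the last chain, concatenate, re-append, with lookahead) by a schedule-then-render two-phase algorithm: phase 1 computes the set of merge positions, phase 2 renders the output in one pass choosing a dot or space separator in front of each surviving word and never touching previously emitted output.
import Mathlib
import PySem

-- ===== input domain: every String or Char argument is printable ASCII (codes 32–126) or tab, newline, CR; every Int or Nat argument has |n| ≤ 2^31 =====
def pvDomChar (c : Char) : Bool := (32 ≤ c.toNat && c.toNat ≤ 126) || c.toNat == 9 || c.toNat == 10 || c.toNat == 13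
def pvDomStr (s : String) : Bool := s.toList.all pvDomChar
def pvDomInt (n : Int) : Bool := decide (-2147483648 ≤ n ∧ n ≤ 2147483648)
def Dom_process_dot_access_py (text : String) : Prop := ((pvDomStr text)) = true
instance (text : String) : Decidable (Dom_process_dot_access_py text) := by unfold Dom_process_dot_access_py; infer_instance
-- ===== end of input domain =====

-- B replaces A's incremental pop/concat/re-append result construction by a two-phase
-- schedule-then-render algorithm (phase 1: set of merge positions; phase 2: render with
-- dot-or-space separators); equal return value proved ('alternative', not faster).

-- ===== PORT A =====
-- A's while loop over index i; the Python list 'result' (append at end, pop last)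
-- is kept in REVERSE order (cons = append, head = pop) and reversed before the join.
def aLoop (words : List String) (result : List String) (i : Nat) : List String :=
  if _h : i < words.length then
    if i + 1 < words.length ∧ ((words.getD i "" == "into" || words.getD i "" == "dot") = true) ∧ result ≠ [] then
      -- prev = result.pop(); result.append(prev + "." + words[i+1]); i += 2
      aLoop words ((result.headD "" ++ "." ++ words.getD (i+1) "") :: result.tail) (i+2)
    else
      aLoop words (words.getD i "" :: result) (i+1)
  else result
termination_by words.length - i
decreasing_by all_goals omega

def process_dot_access_py (text : String) : String :=
  let words := PySem.Str.split₀ text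
  if words = [] then text
  else PySem.Str.join " " (aLoop words [] 0).reverse

-- ===== PORT B =====
-- phase 1: 'while i + 1 < n: if words[i] in ("into","dot"): merges.append(i); i += 2 else: i += 1'
def mergesLoop (words : List String) (n : Nat) (merges : List Nat) (i : Nat) : List Nat :=
  if i + 1 < n then
    if (words.getD i "" == "into" || words.getD i "" == "dot") = true then
      mergesLoop words n (merges ++ [i]) (i + 2)
    else
      mergesLoop words n merges (i + 1)
  else merges
termination_by n - i
decreasing_by all_goals omega

def process_dot_access_py_alt (text : String) : String :=
  let words := PySem.Str.split₀ text
  if words = [] then text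
  else
    let n := words.length
    let msk : PySem.Set Nat := PySem.Set.ofList (mergesLoop words n [] 1)
    -- phase 2: for k in range(1, n): skip scheduled positions, else emit sep + word
    let out := (List.range' 1 (n - 1)).foldl
      (fun out k =>
        if k ∈ msk then out
        else out ++ [(if k - 1 ∈ msk then "." else " ") ++ words.getD k ""])
      [words.getD 0 ""]
    PySem.Str.join "" out

-- ===== PRECONDITION & SPEC =====
def Spec_process_dot_access_py (text : String) (out : String) : Prop := out = process_dot_access_py_alt text
instance (text : String) (out : String) : Decidable (Spec_process_dot_access_py text out) := by unfold Spec_process_dot_access_py; infer_instance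

-- ===== CLAIM (what is proved, stated in full; the proofs are below) =====
def Claim_equal_process_dot_access_py : Prop := ∀ (text : String), Dom_process_dot_access_py text → Spec_process_dot_access_py text (process_dot_access_py text)

-- ===== LEMMAS AND PROOFS =====

-- join bridges (String level; proved via the PySem.Chars.join lemmas)
lemma joinSp_cons (a b : String) (l : List String) :
    PySem.Str.join " " (a :: b :: l) = a ++ " " ++ PySem.Str.join " " (b :: l) := by
  apply String.ext
  simp [PySem.Str.join, PySem.Chars.join_cons_cons]

lemma joinE_cons (a : String) (l : List String) :
    PySem.Str.join "" (a :: l) = a ++ PySem.Str.join "" l := by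
  apply String.ext
  cases l <;> simp [PySem.Str.join, PySem.Chars.join_cons_cons]

lemma joinE_append_singleton (l : List String) (x : String) :
    PySem.Str.join "" (l ++ [x]) = PySem.Str.join "" l ++ x := by
  induction l with
  | nil =>
      rw [List.nil_append, joinE_cons]
      apply String.ext
      simp [PySem.Str.join]
  | cons a l ih => simp only [List.cons_append, joinE_cons, ih, String.append_assoc]

-- the chain list A's loop produces, read off the suffix starting at index i with open chain cur
def goIdxL (words : List String) (i : Nat) (cur : String) : List String :=
  if i < words.length then
    if ((words.getD i "" == "into" || words.getD i "" == "dot") = true) ∧ i + 1 < words.length then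
      goIdxL words (i + 2) (cur ++ "." ++ words.getD (i + 1) "")
    else
      cur :: goIdxL words (i + 1) (words.getD i "")
  else [cur]
termination_by words.length - i
decreasing_by all_goals omega

lemma goIdxL_ne_nil (words : List String) (i : Nat) (cur : String) : goIdxL words i cur ≠ [] := by
  fun_induction goIdxL words i cur with
  | case1 i cur h hc ih => exact ih
  | case2 i cur h hc ih => simp
  | case3 i cur h => simp

lemma aLoop_eq_goIdxL (words : List String) :
    ∀ i cur res, aLoop words (cur :: res) i = (goIdxL words i cur).reverse ++ res := by
  intro i cur res
  fun_induction goIdxL words i cur generalizing res with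
  | case1 i cur h hc ih =>
      rw [aLoop]
      rw [dif_pos h, if_pos ⟨hc.2, hc.1, by simp⟩]
      simp only [List.headD_cons, List.tail_cons]
      exact ih res
  | case2 i cur h hc ih =>
      rw [aLoop]
      rw [dif_pos h, if_neg (by rintro ⟨h1, h2, -⟩; exact hc ⟨h2, h1⟩)]
      rw [ih (cur :: res)]
      simp
  | case3 i cur h =>
      rw [aLoop, dif_neg h]
      simp

-- suffix view of B's phase-1 schedule
def sched (words : List String) (n i : Nat) : List Nat :=
  if i + 1 < n then
    if (words.getD i "" == "into" || words.getD i "" == "dot") = true then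
      i :: sched words n (i + 2)
    else
      sched words n (i + 1)
  else []
termination_by n - i
decreasing_by all_goals omega

lemma mergesLoop_eq_sched (words : List String) (n : Nat) :
    ∀ acc i, mergesLoop words n acc i = acc ++ sched words n i := by
  intro acc i
  fun_induction mergesLoop words n acc i with
  | case1 acc i h hc ih => rw [sched, if_pos h, if_pos hc, ih]; simp
  | case2 acc i h hc ih => rw [sched, if_pos h, if_neg hc, ih]
  | case3 acc i h => rw [sched, if_neg h]; simp

lemma sched_bounds (words : List String) (n : Nat) :
    ∀ i j, j ∈ sched words n i → i ≤ j ∧ j + 1 < n := by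
  intro i
  fun_induction sched words n i with
  | case1 i h hc ih =>
      intro j hj
      rcases List.mem_cons.mp hj with rfl | hj
      · exact ⟨le_refl _, h⟩
      · have := ih j hj; omega
  | case2 i h hc ih =>
      intro j hj; have := ih j hj; omega
  | case3 i h => intro j hj; simp at hj

-- the string phase 2 renders from position i on, given the schedule M
def Rf (words : List String) (M : List Nat) (i : Nat) : String :=
  if i < words.length then
    (if i ∈ M then "" else ((if i - 1 ∈ M then "." else " ") ++ words.getD i "")) ++ Rf words M (i + 1)
  else ""
termination_by words.length - i
decreasing_by all_goals omega

-- phase 2's foldl renders Rf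
lemma fold_render (words : List String) (M : List Nat) :
    ∀ i out, PySem.Str.join "" (List.foldl
      (fun out k =>
        if k ∈ M then out
        else out ++ [(if k - 1 ∈ M then "." else " ") ++ words.getD k ""])
      out (List.range' i (words.length - i))) = PySem.Str.join "" out ++ Rf words M i := by
  intro i
  fun_induction Rf words M i with
  | case1 i h ih =>
      intro out
      have hr : words.length - i = (words.length - (i + 1)) + 1 := by omega
      rw [hr, List.range'_succ, List.foldl_cons, ih]
      by_cases hm : i ∈ M
      · simp [hm]
      · simp [hm, joinE_append_singleton, String.append_assoc]
  | case2 i h =>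
      intro out
      have hr : words.length - i = 0 := by omega
      simp [hr]

-- the rendered string equals the chain join, by simultaneous descent along the schedule
lemma render_eq_go (words : List String) (M : List Nat) :
    ∀ i cur, 1 ≤ i →
      (∀ k, i ≤ k → (k ∈ M ↔ k ∈ sched words words.length i)) →
      (i - 1) ∉ M →
      cur ++ Rf words M i = PySem.Str.join " " (goIdxL words i cur) := by
  intro i cur h1 H Hp
  fun_induction goIdxL words i cur with
  | case1 i cur h hc ih =>
      -- merge step: i ∈ M (it heads sched i), i+1 ∉ M, then recurse at i+2
      have hsched : sched words words.length i = i :: sched words words.length (i + 2) := by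
        rw [sched, if_pos hc.2, if_pos hc.1]
      have hiM : i ∈ M := (H i (le_refl i)).mpr (by rw [hsched]; exact List.mem_cons_self)
      have hi1M : (i + 1) ∉ M := by
        intro hmem
        have := (H (i + 1) (by omega)).mp hmem
        rw [hsched] at this
        rcases List.mem_cons.mp this with h' | h'
        · omega
        · have := (sched_bounds words words.length (i + 2) (i + 1) h').1; omega
      have H' : ∀ k, i + 2 ≤ k → (k ∈ M ↔ k ∈ sched words words.length (i + 2)) := by
        intro k hk
        rw [H k (by omega), hsched, List.mem_cons]
        constructor
        · rintro (rfl | h') ; omega; exact h'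
        · exact Or.inr
      rw [Rf, if_pos h, if_pos hiM, Rf, if_pos hc.2, if_neg hi1M,
        if_pos (by simpa using hiM)]
      rw [← ih (by omega) H' (by simpa using hi1M)]
      simp [String.append_assoc]
  | case2 i cur h hc ih =>
      -- literal step: i ∉ M, emit cur, recurse at i+1
      have hiM : i ∉ M := by
        intro hmem
        have := (H i (le_refl i)).mp hmem
        rw [sched] at this
        split at this
        · split at this
          · rcases List.mem_cons.mp this with h' | h'
            · exact hc ⟨by assumption, by assumption⟩
            · have := (sched_bounds words words.length (i + 2) i h').1; omega
          · have := (sched_bounds words words.length (i + 1) i this).1; omega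
        · simp at this
      have hsched : sched words words.length i = sched words words.length (i + 1) := by
        rw [sched]
        split
        · split
          · exact absurd ⟨by assumption, by assumption⟩ hc
          · rfl
        · rw [sched, if_neg (by omega)]
      have H' : ∀ k, i + 1 ≤ k → (k ∈ M ↔ k ∈ sched words words.length (i + 1)) := by
        intro k hk
        rw [H k (by omega), hsched]
      rw [Rf, if_pos h, if_neg hiM, if_neg Hp]
      have hne := goIdxL_ne_nil words (i + 1) (words.getD i "")
      obtain ⟨b, l, hbl⟩ : ∃ b l, goIdxL words (i + 1) (words.getD i "") = b :: l := by
        cases hg : goIdxL words (i + 1) (words.getD i "") with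
        | nil => exact absurd hg hne
        | cons b l => exact ⟨b, l, rfl⟩
      rw [hbl, joinSp_cons, ← hbl, ← ih (by omega) H' (by simpa using hiM)]
      simp [String.append_assoc]
  | case3 i cur h =>
      rw [Rf, if_neg h]
      apply String.ext
      simp [PySem.Str.join]

-- ===== VERDICT (by name: the statement is the Claim_ definition above) =====
theorem process_dot_access_py_spec : Claim_equal_process_dot_access_py := by
  intro text _
  unfold Spec_process_dot_access_py process_dot_access_py process_dot_access_py_alt
  by_cases hnil : PySem.Str.split₀ text = []
  · simp [hnil]
  · rw [if_neg hnil, if_neg hnil]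
    obtain ⟨w, ws, hw⟩ : ∃ w ws, PySem.Str.split₀ text = w :: ws := by
      cases h : PySem.Str.split₀ text with
      | nil => exact absurd h hnil
      | cons w ws => exact ⟨w, ws, rfl⟩
    set words := PySem.Str.split₀ text with hwords
    have hlen : 0 < words.length := by rw [hw]; simp
    -- A side: first iteration appends words[0]; from i = 1 on, goIdxL describes the loop
    have hA : aLoop words [] 0 = (goIdxL words 1 (words.getD 0 "")).reverse := by
      rw [aLoop, dif_pos hlen, if_neg (by rintro ⟨-, -, h⟩; exact h rfl)]
      simpa using aLoop_eq_goIdxL words 1 (words.getD 0 "") []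
    rw [hA, List.reverse_reverse]
    -- B side: the schedule is sched 1; the fold renders Rf 1
    set M : List Nat := PySem.Set.ofList (mergesLoop words words.length [] 1) with hM
    have hfold := fold_render words M 1 [words.getD 0 ""]
    rw [hfold]
    have hje : PySem.Str.join "" [words.getD 0 ""] = words.getD 0 "" := by
      rw [joinE_cons]; apply String.ext; simp [PySem.Str.join]
    rw [hje]
    -- bridge set membership to the sched list and apply the main lemma
    have hmem : ∀ k, k ∈ M ↔ k ∈ sched words words.length 1 := by
      intro k
      rw [hM, PySem.Set.mem_ofList, mergesLoop_eq_sched]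
      simp
    refine (render_eq_go words M 1 (words.getD 0 "") (le_refl 1) (fun k _ => hmem k) ?_).symm
    intro h0
    have := (sched_bounds words words.length 1 0 ((hmem 0).mp h0)).1
    omega
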